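-- pv_equiv track=rewrite | github.com/AzlanIrshad/pythonscripts | pairs.py | findNumOfPairs
-- ===== SOURCE A (Python) =====
-- def findNumOfPairs(a, b):
--     a.sort()
--     b.sort()
--
--     i, j = 0, 0
--     count = 0
--
--     while i < len(a) and j < len(b):
--         if a[i] > b[j]:
--             count += 1
--             j += 1
--         i += 1
--
--     return count
-- ===== SOURCE B (Python) =====
-- def findNumOfPairs(a, b):
--     a.sort()
--     b.sort()
--     n, m = len(a), len(b)
--
--     def feasible(k):
--         return all(a[n - k + t] > b[t] for t in range(k))
--
--     lo, hi = 0, min(n, m)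
--     while lo < hi:
--         mid = (lo + hi + 1) // 2
--         if feasible(mid):
--             lo = mid
--         else:
--             hi = mid - 1
--     return lo
-- ===== Notes on version B (the rewrite author's own statement) =====
-- stated objective: alternative
-- what changed: B binary-searches for the largest k such that the k largest elements of sorted a pairwise beat the k smallest elements of sorted b (feasibility is downward-monotone on sorted input), instead of A's linear greedy two-pointer scan; same sort-dominated O(n log n) cost.
import Mathlib
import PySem

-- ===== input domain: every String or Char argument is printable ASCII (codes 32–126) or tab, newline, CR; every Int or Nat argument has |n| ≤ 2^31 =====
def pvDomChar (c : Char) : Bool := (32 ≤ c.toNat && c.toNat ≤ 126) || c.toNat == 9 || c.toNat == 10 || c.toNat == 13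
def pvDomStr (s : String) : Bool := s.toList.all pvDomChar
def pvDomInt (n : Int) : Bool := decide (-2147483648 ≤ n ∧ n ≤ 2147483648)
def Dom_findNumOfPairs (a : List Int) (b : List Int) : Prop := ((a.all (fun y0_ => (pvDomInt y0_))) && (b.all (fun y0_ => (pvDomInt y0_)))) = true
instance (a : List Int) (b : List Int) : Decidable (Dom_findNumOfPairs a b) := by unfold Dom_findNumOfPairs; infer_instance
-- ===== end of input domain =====

-- B replaces A's linear greedy two-pointer scan by a binary search for the largest k such that the k
-- largest elements of sorted a pairwise beat the k smallest elements of sorted b (same sort-dominated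
-- cost, a genuinely different algorithm).  Both Pythons sort their list arguments in place; the
-- equivalence proved here is about the return value.

-- ===== PORT A =====
-- A's while loop: i over a, j over b, both ascending.  a[i]/b[j] are in range whenever read
-- (guaranteed by the loop condition), so getD is exact here.
def aLoop (sa sb : List Int) (i j : Nat) (count : Int) : Int :=
  if i < sa.length ∧ j < sb.length then
    if sa.getD i 0 > sb.getD j 0 then aLoop sa sb (i+1) (j+1) (count+1)
    else aLoop sa sb (i+1) j count
  else count
termination_by sa.length - i
decreasing_by all_goals omega

def findNumOfPairs (a : List Int) (b : List Int) : Int :=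
  let sa := PySem.List.sorted a (fun x => x) false
  let sb := PySem.List.sorted b (fun x => x) false
  aLoop sa sb 0 0 0

-- ===== PORT B =====
-- B's feasible(k): all(a[n-k+t] > b[t] for t in range(k)); every call has 0 ≤ k ≤ min(n,m),
-- so the indices are in range and getD with Nat subtraction is exact here.
def pairsFeasible (sa sb : List Int) (k : Nat) : Bool :=
  (List.range k).all (fun t => decide (sb.getD t 0 < sa.getD (sa.length - k + t) 0))

-- B's while loop: binary search on lo..hi for the largest feasible k.
def pairsSearch (sa sb : List Int) (lo hi : Nat) : Nat :=
  if lo < hi then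
    let mid := (lo + hi + 1) / 2
    if pairsFeasible sa sb mid then pairsSearch sa sb mid hi
    else pairsSearch sa sb lo (mid - 1)
  else lo
termination_by hi - lo
decreasing_by all_goals omega

def findNumOfPairs_alt (a : List Int) (b : List Int) : Int :=
  let sa := PySem.List.sorted a (fun x => x) false
  let sb := PySem.List.sorted b (fun x => x) false
  (pairsSearch sa sb 0 (min sa.length sb.length) : Int)

-- ===== PRECONDITION & SPEC =====
def Spec_findNumOfPairs (a : List Int) (b : List Int) (out : Int) : Prop := out = findNumOfPairs_alt a b
instance (a : List Int) (b : List Int) (out : Int) : Decidable (Spec_findNumOfPairs a b out) := by unfold Spec_findNumOfPairs; infer_instance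

-- ===== CLAIM (what is proved, stated in full; the proofs are below) =====
def Claim_equal_findNumOfPairs : Prop := ∀ (a : List Int) (b : List Int), Dom_findNumOfPairs a b → Spec_findNumOfPairs a b (findNumOfPairs a b)

-- ===== LEMMAS AND PROOFS =====

-- A's loop as structural recursion on the two (suffix) lists, Nat-valued.
def cntN : List Int → List Int → Nat
  | [], _ => 0
  | _ :: _, [] => 0
  | x :: xs, y :: ys => if y < x then 1 + cntN xs ys else cntN xs (y :: ys)

theorem cntN_nil_right (xs : List Int) : cntN xs [] = 0 := by cases xs <;> rfl

theorem aLoop_eq_cntN (sa sb : List Int) (i j : Nat) (count : Int) :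
    aLoop sa sb i j count = count + (cntN (sa.drop i) (sb.drop j) : Int) := by
  induction i, j, count using aLoop.induct sa sb with
  | case1 i j count h hgt ih =>
    rw [aLoop, if_pos h, if_pos hgt, ih,
        List.drop_eq_getElem_cons h.1, List.drop_eq_getElem_cons h.2]
    rw [List.getD_eq_getElem _ _ h.1, List.getD_eq_getElem _ _ h.2] at hgt
    simp only [cntN, if_pos hgt]
    push_cast; ring
  | case2 i j count h hgt ih =>
    rw [aLoop, if_pos h, if_neg hgt, ih, List.drop_eq_getElem_cons h.1,
        List.drop_eq_getElem_cons h.2]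
    rw [List.getD_eq_getElem _ _ h.1, List.getD_eq_getElem _ _ h.2] at hgt
    simp only [cntN, if_neg hgt]
  | case3 i j count h =>
    rw [aLoop, if_neg h]
    rcases Decidable.not_and_iff_or_not.mp h with h' | h'
    · have hd : List.drop i sa = [] := List.drop_eq_nil_of_le (by omega)
      rw [hd]; simp [cntN]
    · have hd : List.drop j sb = [] := List.drop_eq_nil_of_le (by omega)
      rw [hd, cntN_nil_right]; simp

-- feasibility of k: the k largest of sa pairwise beat the k smallest of sb
def Feas (sa sb : List Int) (k : Nat) : Prop :=
  k ≤ sa.length ∧ k ≤ sb.length ∧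
    ∀ t, t < k → sb.getD t 0 < sa.getD (sa.length - k + t) 0

theorem pairsFeasible_iff (sa sb : List Int) (k : Nat) :
    pairsFeasible sa sb k = true ↔ ∀ t, t < k → sb.getD t 0 < sa.getD (sa.length - k + t) 0 := by
  simp [pairsFeasible]

-- sorted lists are getD-monotone
theorem sorted_getD_mono (l : List Int) (h : l.Pairwise (· ≤ ·)) (i j : Nat)
    (hij : i ≤ j) (hj : j < l.length) : l.getD i 0 ≤ l.getD j 0 := by
  rcases Nat.lt_or_ge i j with hlt | hge
  · rw [List.getD_eq_getElem _ _ (by omega), List.getD_eq_getElem _ _ hj]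
    exact (List.pairwise_iff_getElem.mp h) i j (by omega) hj hlt
  · have : i = j := by omega
    subst this; exact le_refl _

-- feasibility is downward-closed on sorted a
theorem Feas_mono (sa sb : List Int) (hs : sa.Pairwise (· ≤ ·)) (j k : Nat)
    (hjk : j ≤ k) (hF : Feas sa sb k) : Feas sa sb j := by
  obtain ⟨h1, h2, h3⟩ := hF
  refine ⟨by omega, by omega, fun t ht => ?_⟩
  have := h3 t (by omega)
  exact lt_of_lt_of_le this
    (sorted_getD_mono sa hs (sa.length - k + t) (sa.length - j + t) (by omega) (by omega))

-- A's greedy count is feasible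
theorem cnt_feas : ∀ xs ys : List Int, xs.Pairwise (· ≤ ·) → ys.Pairwise (· ≤ ·) →
    Feas xs ys (cntN xs ys) := by
  intro xs ys
  induction xs, ys using cntN.induct with
  | case1 ys =>
    intro _ _
    show Feas [] ys 0
    exact ⟨Nat.zero_le _, Nat.zero_le _, fun t ht => by omega⟩
  | case2 x xs =>
    intro _ _
    rw [cntN_nil_right]
    exact ⟨Nat.zero_le _, Nat.zero_le _, fun t ht => by omega⟩
  | case3 x xs y ys hlt ih =>
    intro hxs hys
    obtain ⟨c1, c2, c3⟩ := ih (List.pairwise_cons.mp hxs).2 (List.pairwise_cons.mp hys).2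
    set c := cntN xs ys with hc
    have : cntN (x :: xs) (y :: ys) = 1 + c := by rw [cntN, if_pos hlt]
    rw [this]
    refine ⟨by simp; omega, by simp; omega, fun t ht => ?_⟩
    have hidx : (x :: xs).length - (1 + c) + t = xs.length - c + t := by simp; omega
    rw [hidx]
    match t with
    | 0 =>
      have h0 := sorted_getD_mono (x :: xs) hxs 0 (xs.length - c + 0) (by omega) (by simp only [List.length_cons]; omega)
      rw [List.getD_cons_zero] at h0
      rw [List.getD_cons_zero]
      exact lt_of_lt_of_le hlt h0
    | s + 1 =>
      have h1' : xs.length - c + (s + 1) = (xs.length - c + s) + 1 := by omega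
      rw [h1', List.getD_cons_succ, List.getD_cons_succ]
      exact c3 s (by omega)
  | case4 x xs y ys hlt ih =>
    intro hxs hys
    obtain ⟨c1, c2, c3⟩ := ih (List.pairwise_cons.mp hxs).2 hys
    set c := cntN xs (y :: ys) with hc
    have : cntN (x :: xs) (y :: ys) = c := by rw [cntN, if_neg hlt]
    rw [this]
    refine ⟨by simp; omega, by omega, fun t ht => ?_⟩
    have hidx : (x :: xs).length - c + t = (xs.length - c + t) + 1 := by simp; omega
    rw [hidx, List.getD_cons_succ]
    exact c3 t ht

-- A's greedy count is maximal among feasible k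
theorem cnt_max : ∀ xs ys : List Int, xs.Pairwise (· ≤ ·) → ys.Pairwise (· ≤ ·) →
    ∀ k, Feas xs ys k → k ≤ cntN xs ys := by
  intro xs ys
  induction xs, ys using cntN.induct with
  | case1 ys => intro _ _ k hF; exact le_trans hF.1 (Nat.zero_le _)
  | case2 x xs => intro _ _ k hF; exact le_trans hF.2.1 (Nat.zero_le _)
  | case3 x xs y ys hlt ih =>
    intro hxs hys k hF
    obtain ⟨h1, h2, h3⟩ := hF
    have hcnt : cntN (x :: xs) (y :: ys) = 1 + cntN xs ys := by rw [cntN, if_pos hlt]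
    match k with
    | 0 => omega
    | j + 1 =>
      have hj : Feas xs ys j := by
        refine ⟨by simp at h1; omega, by simp at h2; omega, fun t ht => ?_⟩
        have h1' : j ≤ xs.length := by simp at h1; omega
        have hidx : (x :: xs).length - (j + 1) + (t + 1) = (xs.length - j + t) + 1 := by
          simp; omega
        have := h3 (t + 1) (by omega)
        rw [hidx, List.getD_cons_succ, List.getD_cons_succ] at this
        exact this
      have := ih (List.pairwise_cons.mp hxs).2 (List.pairwise_cons.mp hys).2 j hj
      omega
  | case4 x xs y ys hlt ih =>
    intro hxs hys k hF
    obtain ⟨h1, h2, h3⟩ := hF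
    have hcnt : cntN (x :: xs) (y :: ys) = cntN xs (y :: ys) := by rw [cntN, if_neg hlt]
    have hkn : k ≤ xs.length := by
      by_contra hgt
      have hk : k = xs.length + 1 := by simp at h1; omega
      have := h3 0 (by omega)
      rw [hk] at this
      simp at this
      exact hlt this
    have hk' : Feas xs (y :: ys) k := by
      refine ⟨hkn, h2, fun t ht => ?_⟩
      have hidx : (x :: xs).length - k + t = (xs.length - k + t) + 1 := by simp; omega
      have := h3 t ht
      rw [hidx, List.getD_cons_succ] at this
      exact this
    rw [hcnt]
    exact ih (List.pairwise_cons.mp hxs).2 hys k hk'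

-- binary search with the invariant lo ≤ K ≤ hi finds the maximal feasible K
theorem pairsSearch_eq (sa sb : List Int) (hs : sa.Pairwise (· ≤ ·)) (K : Nat)
    (hK : Feas sa sb K) (hmax : ∀ k, Feas sa sb k → k ≤ K) :
    ∀ lo hi, lo ≤ K → K ≤ hi → hi ≤ min sa.length sb.length →
      pairsSearch sa sb lo hi = K := by
  intro lo hi
  fun_induction pairsSearch sa sb lo hi with
  | case1 lo hi h mid hfeas ih =>
    intro hlo hhi hmin
    have hmid : Feas sa sb mid :=
      ⟨by omega, by omega, (pairsFeasible_iff sa sb mid).mp hfeas⟩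
    exact ih (hmax mid hmid) hhi hmin
  | case2 lo hi h mid hfeas ih =>
    intro hlo hhi hmin
    have hKmid : K ≤ mid - 1 := by
      by_contra hc
      have : Feas sa sb mid := Feas_mono sa sb hs mid K (by omega) hK
      rw [(pairsFeasible_iff sa sb mid).mpr this.2.2] at hfeas
      exact absurd rfl hfeas
    exact ih hlo hKmid (by omega)
  | case3 lo hi h =>
    intro hlo hhi hmin
    omega

-- ===== VERDICT (by name: the statement is the Claim_ definition above) =====
theorem findNumOfPairs_spec : Claim_equal_findNumOfPairs := by
  unfold Claim_equal_findNumOfPairs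
  intro a b _
  unfold Spec_findNumOfPairs findNumOfPairs findNumOfPairs_alt
  show aLoop (PySem.List.sorted a (fun x => x) false) (PySem.List.sorted b (fun x => x) false) 0 0 0
      = (pairsSearch (PySem.List.sorted a (fun x => x) false) (PySem.List.sorted b (fun x => x) false) 0
          (min (PySem.List.sorted a (fun x => x) false).length (PySem.List.sorted b (fun x => x) false).length) : Int)
  set sa := PySem.List.sorted a (fun x => x) false with hsa
  set sb := PySem.List.sorted b (fun x => x) false with hsb
  have hpa : sa.Pairwise (· ≤ ·) := PySem.List.sorted_pairwise a (fun x => x)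
  have hpb : sb.Pairwise (· ≤ ·) := PySem.List.sorted_pairwise b (fun x => x)
  have hF := cnt_feas sa sb hpa hpb
  have hM := cnt_max sa sb hpa hpb
  have hA : aLoop sa sb 0 0 0 = (cntN sa sb : Int) := by
    simpa using aLoop_eq_cntN sa sb 0 0 0
  have hB : pairsSearch sa sb 0 (min sa.length sb.length) = cntN sa sb :=
    pairsSearch_eq sa sb hpa (cntN sa sb) hF hM 0 (min sa.length sb.length)
      (Nat.zero_le _) (by have := hF.1; have := hF.2.1; omega) le_rfl
  rw [hA, hB]
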